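-- pv_equiv track=rewrite | github.com/OliverSpacey/Data-Driven-Assignment-OCR | data driven assignment/system.py | checkDiagBL
-- ===== SOURCE A (Python) =====
-- def compare(string, array):
--     for i in range(len(string)):
--         if string[i] != array[i]:
--             return False
--     return True
--
-- def compareEstimate(string, array):
--     incorrect = 0
--     for i in range(len(string)):
--         if string[i] != array[i]:
--             incorrect += 1
--     if incorrect > 1:
--         return False
--     else:
--         return True
--
-- def checkDiagBL(array, word, i, j, height, width, estimate):
--     temp = []
--     if i+len(word)-1 < height and j-len(word)+1 > 0:
--         for x in range(len(word)):
--             temp.append(array[i+x][j-x])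
--         if (compare(word, temp) and not estimate) or (compareEstimate(word, temp) and estimate):
--             return True
--     return False
-- ===== SOURCE B (Python) =====
-- def checkDiagBL(array, word, i, j, height, width, estimate):
--     if not (i + len(word) - 1 < height and j - len(word) + 1 > 0):
--         return False
--
--     def walk(x, budget):
--         # recursive early-exit walk along the diagonal with a mismatch budget
--         if x == len(word):
--             return True
--         if word[x] != array[i + x][j - x]:
--             if budget == 0:
--                 return False
--             budget -= 1
--         return walk(x + 1, budget)
--
--     return walk(0, 1 if estimate else 0)
-- ===== Notes on version B (the rewrite author's own statement) =====
-- stated objective: alternative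
-- what changed: Replaces A's build-a-temp-list then two whole-word helper compares with a recursive budget-carrying walk along the diagonal that stops early (returns False) as soon as the allowed number of mismatches (1 if estimate else 0) is exceeded; no temporary list and no full mismatch count are ever built.
import Mathlib
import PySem

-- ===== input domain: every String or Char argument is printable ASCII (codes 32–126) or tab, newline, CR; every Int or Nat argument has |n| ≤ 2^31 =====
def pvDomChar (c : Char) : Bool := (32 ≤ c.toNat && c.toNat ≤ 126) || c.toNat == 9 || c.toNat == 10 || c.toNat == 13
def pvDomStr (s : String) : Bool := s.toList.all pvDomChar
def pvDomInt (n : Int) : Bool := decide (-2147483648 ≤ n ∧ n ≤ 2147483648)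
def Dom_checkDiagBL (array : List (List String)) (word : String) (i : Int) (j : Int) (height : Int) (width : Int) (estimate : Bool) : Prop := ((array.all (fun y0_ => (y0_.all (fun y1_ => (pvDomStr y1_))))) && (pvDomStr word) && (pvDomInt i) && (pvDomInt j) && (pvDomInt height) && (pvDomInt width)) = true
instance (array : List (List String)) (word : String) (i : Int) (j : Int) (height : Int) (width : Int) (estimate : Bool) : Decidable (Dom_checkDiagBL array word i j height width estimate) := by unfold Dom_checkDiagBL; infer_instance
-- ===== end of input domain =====

-- B replaces A's build-temp-list-then-two-helper-compares with a recursive early-exit walk carrying a mismatch budget (objective: alternative).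


-- ===== PORT A =====
-- compare(string, array): scan, False at first mismatch (string[i] is a one-char str; getD defaults unreachable on A's calls)
def pvCompare (s : List Char) (arr : List String) : Bool :=
  (List.range s.length).all (fun idx => String.mk [s.getD idx ' '] == arr.getD idx "")

-- compareEstimate(string, array): count mismatches, False iff more than one
def pvCompareEstimate (s : List Char) (arr : List String) : Bool :=
  let incorrect : Nat := (List.range s.length).foldl
    (fun acc idx => if String.mk [s.getD idx ' '] != arr.getD idx "" then acc + 1 else acc) 0
  if incorrect > 1 then false else true

def checkDiagBL (array : List (List String)) (word : String) (i : Int) (j : Int) (height : Int) (width : Int) (estimate : Bool) : Bool :=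
  let w := word.toList
  if decide (i + (w.length : Int) - 1 < height) && decide (j - (w.length : Int) + 1 > 0) then
    -- temp = [array[i+x][j-x] for x in range(len(word))]  (pyGet?; Pre_ guarantees some, getD default unreachable under Pre_)
    let temp := (List.range w.length).map (fun (x : Nat) =>
      (PySem.List.pyGet? ((PySem.List.pyGet? array (i + (x : Int) : Int)).getD []) (j - (x : Int))).getD "")
    if (pvCompare w temp && !estimate) || (pvCompareEstimate w temp && estimate) then true else false
  else false

-- ===== PORT B =====
-- walk(x, budget): recursive early-exit diagonal walk; Python only reaches x ≤ len(word), the ≤ guard merely makes it total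
def pvWalk (w : List Char) (f : Nat → String) (x : Nat) (budget : Nat) : Bool :=
  if _h : w.length ≤ x then true
  else if String.mk [w.getD x ' '] != f x then
    if budget = 0 then false else pvWalk w f (x + 1) (budget - 1)
  else pvWalk w f (x + 1) budget
termination_by w.length - x
decreasing_by all_goals omega

def checkDiagBL_alt (array : List (List String)) (word : String) (i : Int) (j : Int) (height : Int) (width : Int) (estimate : Bool) : Bool :=
  let w := word.toList
  if !(decide (i + (w.length : Int) - 1 < height) && decide (j - (w.length : Int) + 1 > 0)) then false
  else
    pvWalk w (fun (x : Nat) =>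
        (PySem.List.pyGet? ((PySem.List.pyGet? array (i + (x : Int) : Int)).getD []) (j - (x : Int))).getD "")
      0 (if estimate then 1 else 0)

-- ===== PRECONDITION & SPEC =====
-- Pre_ excludes exactly the inputs on which A's indexing array[i+x][j-x] raises IndexError (it is checked only when the bounds guard passes, since otherwise A never indexes).
def Pre_checkDiagBL (array : List (List String)) (word : String) (i : Int) (j : Int) (height : Int) (width : Int) (estimate : Bool) : Prop :=
  (i + (word.toList.length : Int) - 1 < height ∧ j - (word.toList.length : Int) + 1 > 0) →
    ∀ x : Nat, x < word.toList.length →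
      PySem.Raise.InRange array.length (i + (x : Int) : Int) ∧
      PySem.Raise.InRange ((PySem.List.pyGet? array (i + (x : Int) : Int)).getD []).length (j - (x : Int))
instance (array : List (List String)) (word : String) (i : Int) (j : Int) (height : Int) (width : Int) (estimate : Bool) : Decidable (Pre_checkDiagBL array word i j height width estimate) := by unfold Pre_checkDiagBL; infer_instance

def pvWitness_checkDiagBL : List (List String) × String × Int × Int × Int × Int × Bool :=
  ([["x", "a"], ["b", "y"]], "a", 0, 1, 2, 2, false)

def Spec_checkDiagBL (array : List (List String)) (word : String) (i : Int) (j : Int) (height : Int) (width : Int) (estimate : Bool) (out : Bool) : Prop := out = checkDiagBL_alt array word i j height width estimate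
instance (array : List (List String)) (word : String) (i : Int) (j : Int) (height : Int) (width : Int) (estimate : Bool) (out : Bool) : Decidable (Spec_checkDiagBL array word i j height width estimate out) := by unfold Spec_checkDiagBL; infer_instance

-- ===== CLAIM (what is proved, stated in full; the proofs are below) =====
def Claim_equal_checkDiagBL : Prop := ∀ (array : List (List String)) (word : String) (i : Int) (j : Int) (height : Int) (width : Int) (estimate : Bool), Dom_checkDiagBL array word i j height width estimate → Pre_checkDiagBL array word i j height width estimate → Spec_checkDiagBL array word i j height width estimate (checkDiagBL array word i j height width estimate)

-- ===== LEMMAS AND PROOFS =====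

-- the counting fold is countP
theorem pvFoldlCount {α : Type} (L : List α) (q : α → Bool) (acc : Nat) :
    L.foldl (fun a x => if q x then a + 1 else a) acc = acc + L.countP q := by
  induction L generalizing acc with
  | nil => simp
  | cons hd tl ih =>
    by_cases h : q hd <;> simp [List.countP_cons, h, ih] <;> omega

theorem pvTempGetD (n : Nat) (f : Nat → String) (x : Nat) (hx : x < n) :
    ((List.range n).map f).getD x "" = f x := by
  simp [List.getD, hx]

-- the budget walk decides "at most `budget` mismatches remain from position x"
theorem pvWalk_eq (w : List Char) (f : Nat → String) :
    ∀ (n x budget : Nat), w.length - x ≤ n →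
      pvWalk w f x budget
        = decide ((List.range' x (w.length - x)).countP
            (fun y => String.mk [w.getD y ' '] != f y) ≤ budget) := by
  intro n
  induction n with
  | zero =>
    intro x budget h
    have hx : w.length ≤ x := by omega
    rw [pvWalk]
    simp [hx, Nat.sub_eq_zero_of_le hx]
  | succ n ih =>
    intro x budget h
    rw [pvWalk]
    by_cases hx : w.length ≤ x
    · simp [hx, Nat.sub_eq_zero_of_le hx]
    · have hlen : w.length - x = (w.length - (x + 1)) + 1 := by omega
      have hrec : w.length - (x + 1) ≤ n := by omega
      rw [hlen, List.range'_succ, List.countP_cons]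
      by_cases hm : (String.mk [w.getD x ' '] != f x) = true
      · cases budget with
        | zero =>
          rw [dif_neg hx, if_pos hm, if_pos rfl, if_pos hm]
          simp
        | succ b =>
          rw [dif_neg hx, if_pos hm, if_neg (Nat.succ_ne_zero b), if_pos hm]
          simp only [Nat.add_sub_cancel]
          rw [ih (x + 1) b hrec]
          simp [Nat.add_le_add_iff_right]
      · rw [dif_neg hx, if_neg hm, if_neg hm]
        rw [ih (x + 1) budget hrec]
        simp

theorem checkDiagBL_spec_aux (array : List (List String)) (word : String) (i : Int) (j : Int)
    (height : Int) (width : Int) (estimate : Bool) :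
    checkDiagBL array word i j height width estimate
      = checkDiagBL_alt array word i j height width estimate := by
  unfold checkDiagBL checkDiagBL_alt
  set w := word.toList with hw
  cases hg : (decide (i + (w.length : Int) - 1 < height) && decide (j - (w.length : Int) + 1 > 0)) with
  | false => simp only [hg, Bool.not_false, Bool.false_eq_true, if_false, if_true]
  | true =>
    simp only [hg, Bool.not_true, Bool.false_eq_true, if_false, if_true]
    set f : Nat → String := fun (x : Nat) =>
      (PySem.List.pyGet? ((PySem.List.pyGet? array (i + (x : Int) : Int)).getD []) (j - (x : Int))).getD ""
      with hf
    have htemp : ∀ x ∈ List.range w.length,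
        ((List.range w.length).map f).getD x "" = f x := by
      intro x hx
      exact pvTempGetD _ _ _ (List.mem_range.mp hx)
    set q : Nat → Bool := fun x => String.mk [w.getD x ' '] != f x with hq
    -- B's walk decides countP ≤ budget
    have hwalk : pvWalk w f 0 (if estimate then 1 else 0)
        = decide ((List.range w.length).countP q ≤ (if estimate then 1 else 0)) := by
      have := pvWalk_eq w f w.length 0 (if estimate then 1 else 0) (by omega)
      simpa [List.range_eq_range'] using this
    -- compareEstimate's fold over temp equals the same count
    have hcntA : (List.range w.length).foldl
        (fun acc idx => if String.mk [w.getD idx ' '] != ((List.range w.length).map f).getD idx ""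
          then acc + 1 else acc) 0 = (List.range w.length).countP q := by
      have hc := PySem.List.foldl_congr_mem
        (l := List.range w.length) (init := (0 : Nat))
        (f := fun acc idx => if String.mk [w.getD idx ' '] != ((List.range w.length).map f).getD idx ""
          then acc + 1 else acc)
        (g := fun acc x => if q x then acc + 1 else acc)
        (by intro acc x hx; simp only [htemp x hx, hq])
      rw [hc]
      simpa using pvFoldlCount _ _ 0
    have hcomp : pvCompare w ((List.range w.length).map f)
        = decide ((List.range w.length).countP q = 0) := by
      unfold pvCompare
      by_cases hz : (List.range w.length).countP q = 0
      · simp only [hz, decide_true]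
        rw [List.all_eq_true]
        intro x hx
        have := (List.countP_eq_zero.mp hz) x hx
        rw [htemp x hx]
        simpa [hq, Bool.not_eq_true] using this
      · simp only [hz, decide_false]
        rw [Bool.eq_false_iff, ne_eq, List.all_eq_true]
        intro hall
        apply hz
        rw [List.countP_eq_zero]
        intro x hx
        have := hall x hx
        rw [htemp x hx] at this
        simpa [hq] using this
    have hest : pvCompareEstimate w ((List.range w.length).map f)
        = decide ((List.range w.length).countP q ≤ 1) := by
      unfold pvCompareEstimate
      rw [hcntA]
      by_cases h1 : (List.range w.length).countP q ≤ 1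
      · simp [h1, Nat.not_lt.mpr h1]
      · simp [h1, Nat.lt_of_not_le h1]
    rw [hcomp, hest, hwalk]
    cases estimate <;> simp [Nat.le_zero]

-- ===== VERDICT (by name: the statement is the Claim_ definition above) =====
theorem checkDiagBL_spec : Claim_equal_checkDiagBL := by
  intro array word i j height width estimate _ _
  unfold Spec_checkDiagBL
  exact checkDiagBL_spec_aux array word i j height width estimate
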